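-- pv_equiv track=rewrite | github.com/wdv4758h/sograph | sograph.py | _parse_unused
-- ===== SOURCE A (Python) =====
-- def _parse_unused(command: str, unused: str) -> dict:
--
--     start = False   # flag for parsing
--     name = ''       # shared object's name as key
--     unused_depend = { command: set() }     # dict for result
--                                            # dict: str -> set
--
--     for line in unused.split('\n'):
--
--         if 'Unused direct dependencies' in line:
--             start = True
--             continue
--
--         if start and line:
--             lib = line.strip()  # e.g. "/usr/lib/libcap.so.2"
--             unused_depend[command].add(lib)
--
--     return unused_depend
-- ===== SOURCE B (Python) =====
-- MARKER = 'Unused direct dependencies'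
--
-- def _parse_unused(command: str, unused: str) -> dict:
--     # string-level: cut the text at the first marker occurrence, then at the
--     # next newline, and only ever iterate the lines after that cut
--     _, sep, tail = unused.partition(MARKER)
--     if not sep:
--         return {command: set()}
--     _, sep2, rest = tail.partition('\n')
--     if not sep2:
--         return {command: set()}
--     deps = set()
--     for line in rest.split('\n'):
--         if line and MARKER not in line:
--             deps.add(line.strip())
--     return {command: deps}
-- ===== Notes on version B (the rewrite author's own statement) =====
-- stated objective: alternative
-- what changed: Replaces A's line-by-line scan with a stateful flag by string-level cutting: partition the whole text at the first marker occurrence and then at the next newline, so only the text after that cut is ever split into lines and filtered; the pre-header portion is never iterated line by line.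
import Mathlib
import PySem

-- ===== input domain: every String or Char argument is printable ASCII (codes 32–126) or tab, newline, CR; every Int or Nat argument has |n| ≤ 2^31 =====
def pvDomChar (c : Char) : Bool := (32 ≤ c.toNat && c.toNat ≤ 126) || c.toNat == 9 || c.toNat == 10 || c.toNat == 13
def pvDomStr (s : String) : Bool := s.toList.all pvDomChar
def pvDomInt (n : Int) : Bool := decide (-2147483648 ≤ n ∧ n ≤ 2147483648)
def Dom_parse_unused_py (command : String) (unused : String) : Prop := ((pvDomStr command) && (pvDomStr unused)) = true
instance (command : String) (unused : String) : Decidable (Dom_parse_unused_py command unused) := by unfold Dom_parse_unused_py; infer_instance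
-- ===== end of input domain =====

-- B replaces A's stateful line-by-line scan by string-level cutting (partition at the first
-- marker occurrence, then at the next newline) so only the text after the cut is split into
-- lines; same asymptotic cost, same value.

def pvMarker : String := "Unused direct dependencies"

-- ===== PORT A =====
-- unused.split('\n'): split? is none only for an empty separator, so getD [] is exact here
def pvLines (s : String) : List String := (PySem.Str.split? s "\n").getD []

-- A's dict holds the single key `command` throughout (created as {command: set()} and only
-- its value set is mutated), so the dict is represented as that one (key, set) pair.
def pvStepA (st : Bool × PySem.Set String) (line : String) : Bool × PySem.Set String :=
  if PySem.Str.isIn pvMarker line then (true, st.2)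
  else if st.1 ∧ line ≠ "" then (st.1, PySem.Set.add st.2 (PySem.Str.strip line))
  else st

def parse_unused_py (command : String) (unused : String) : List (String × List String) :=
  let r := (pvLines unused).foldl pvStepA (false, PySem.Set.empty)
  [(command, r.2)]

-- ===== PORT B =====
def pvStepB (s : PySem.Set String) (line : String) : PySem.Set String :=
  if line ≠ "" ∧ ¬ PySem.Str.isIn pvMarker line then PySem.Set.add s (PySem.Str.strip line)
  else s

-- u.partition(sub) is ported by hand (PySem has no partition): p = u.find(sub); sep is empty
-- iff p == -1, and the tail is the slice u[p+len(sub):] — exact for str.partition.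
def parse_unused_py_alt (command : String) (unused : String) : List (String × List String) :=
  let p := PySem.Str.find unused pvMarker
  if p = -1 then [(command, PySem.Set.empty)]
  else
    let tail := PySem.Str.slice unused (some (p + PySem.Str.len pvMarker)) none
    let q := PySem.Str.find tail "\n"
    if q = -1 then [(command, PySem.Set.empty)]
    else
      let rest := PySem.Str.slice tail (some (q + 1)) none
      [(command, ((PySem.Str.split? rest "\n").getD []).foldl pvStepB PySem.Set.empty)]

-- ===== PRECONDITION & SPEC =====
def Spec_parse_unused_py (command : String) (unused : String) (out : List (String × List String)) : Prop := out = parse_unused_py_alt command unused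
instance (command : String) (unused : String) (out : List (String × List String)) : Decidable (Spec_parse_unused_py command unused out) := by unfold Spec_parse_unused_py; infer_instance

-- ===== CLAIM (what is proved, stated in full; the proofs are below) =====
def Claim_equal_parse_unused_py : Prop := ∀ (command : String) (unused : String), Dom_parse_unused_py command unused → Spec_parse_unused_py command unused (parse_unused_py command unused)

-- ===== LEMMAS AND PROOFS =====

-- Everything is reasoned about at the List Char level (pvMarker.toList is the marker's characters).

-- Chars-level images of the two step functions (the Str-level folds are bridged onto these).
def pvStepAC (st : Bool × PySem.Set String) (line : List Char) : Bool × PySem.Set String :=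
  if PySem.Chars.isIn pvMarker.toList line then (true, st.2)
  else if st.1 ∧ line ≠ [] then (st.1, PySem.Set.add st.2 (String.ofList (PySem.Chars.strip line)))
  else st

def pvStepBC (s : PySem.Set String) (line : List Char) : PySem.Set String :=
  if line ≠ [] ∧ ¬ PySem.Chars.isIn pvMarker.toList line then PySem.Set.add s (String.ofList (PySem.Chars.strip line))
  else s

def pvG (L : List (List Char)) : PySem.Set String := L.foldl pvStepBC PySem.Set.empty

-- the common functional value: the set of stripped good lines after the first header line
def pvASpec (L : List (List Char)) : PySem.Set String :=
  match L.findIdx? (fun l => PySem.Chars.isIn pvMarker.toList l) with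
  | none => PySem.Set.empty
  | some i => pvG (L.drop (i + 1))

-- Chars-level image of B's computation
def pvBCore (cs : List Char) : PySem.Set String :=
  if PySem.Chars.find cs pvMarker.toList = -1 then PySem.Set.empty
  else if PySem.Chars.find (cs.drop ((PySem.Chars.find cs pvMarker.toList).toNat + pvMarker.toList.length)) ['\n'] = -1 then PySem.Set.empty
  else pvG (List.splitOn '\n'
    ((cs.drop ((PySem.Chars.find cs pvMarker.toList).toNat + pvMarker.toList.length)).drop
      ((PySem.Chars.find (cs.drop ((PySem.Chars.find cs pvMarker.toList).toNat + pvMarker.toList.length)) ['\n']).toNat + 1)))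

-- --- PySem.Chars.splitOn is List.splitOn for a one-character separator ---
theorem pv_go_inv (c : Char) (fuel : Nat) :
    ∀ (l cur : List Char) (accs : List (List Char)), l.length ≤ fuel →
      PySem.Chars.splitOn.go [c] fuel l cur accs =
        accs.reverse ++ (List.splitOnP (· == c) l).modifyHead (cur.reverse ++ ·) := by
  induction fuel with
  | zero =>
    intro l cur accs hle
    have : l = [] := List.eq_nil_of_length_eq_zero (Nat.le_zero.mp hle)
    subst this
    simp [PySem.Chars.splitOn.go, List.splitOnP_nil]
  | succ n ih =>
    intro l cur accs hle
    cases l with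
    | nil => simp [PySem.Chars.splitOn.go, List.splitOnP_nil]
    | cons c0 rest =>
      rw [PySem.Chars.splitOn.go]
      by_cases h : c = c0
      · subst h
        have hpre : List.isPrefixOf [c] (c :: rest) = true := by simp [List.isPrefixOf]
        rw [if_pos hpre]
        rw [ih _ _ _ (by simpa using Nat.le_of_succ_le_succ hle)]
        simp [List.splitOnP_cons]
        cases List.splitOnP (fun x => x == c) rest <;> rfl
      · have hpre : List.isPrefixOf [c] (c0 :: rest) = false := by
          simp [List.isPrefixOf]; exact fun hh => absurd hh h
        rw [if_neg (by simp [hpre])]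
        rw [ih _ _ _ (by simpa using Nat.le_of_succ_le_succ hle)]
        rw [List.splitOnP_cons]
        have hne : (c0 == c) = false := by simp; exact fun hh => absurd hh.symm h
        rw [if_neg (by simp [hne])]
        obtain ⟨h0, t0, hsp⟩ := List.exists_cons_of_ne_nil (List.splitOnP_ne_nil (· == c) rest)
        rw [hsp]
        simp [List.modifyHead]

theorem pv_splitOn_eq (c : Char) (s : List Char) :
    PySem.Chars.splitOn s [c] = List.splitOn c s := by
  rw [PySem.Chars.splitOn, pv_go_inv c (s.length + 1) s [] [] (Nat.le_succ _)]
  obtain ⟨h0, t0, hsp⟩ := List.exists_cons_of_ne_nil (List.splitOnP_ne_nil (· == c) s)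
  rw [List.splitOn, hsp]
  simp [List.modifyHead]

-- --- substring-position lemmas (the marker contains no newline) ---
theorem pv_prefix_split {M l t : List Char} {c : Char} (hc : c ∉ M)
    (h : M <+: l ++ c :: t) : M <+: l := by
  rcases le_or_gt M.length l.length with hle | hlt
  · obtain ⟨r, hr⟩ := h
    have hM : M = (l ++ c :: t).take M.length := by
      rw [← hr, List.take_left']; rfl
    rw [List.take_append_of_le_length hle] at hM
    rw [hM]
    exact List.take_prefix _ _
  · exfalso
    obtain ⟨r, hr⟩ := h
    have hlen : l.length < (M ++ r).length := by
      simp [List.length_append]; omega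
    have h1 : (M ++ r)[l.length]'hlen = M[l.length]'hlt := List.getElem_append_left hlt
    have h2 : (M ++ r)[l.length]'hlen = c := by
      have h3 : (l ++ c :: t)[l.length]'(by simp) = c := by
        rw [List.getElem_append_right (Nat.le_refl _)]
        simp
      exact (List.getElem_of_eq hr hlen).trans h3
    exact hc (h2 ▸ h1 ▸ List.getElem_mem _)

theorem pv_infix_iff_exists_drop (M s : List Char) : M <:+: s ↔ ∃ j, M <+: s.drop j := by
  constructor
  · rintro ⟨u, v, rfl⟩
    refine ⟨u.length, ?_⟩
    rw [List.append_assoc, List.drop_left]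
    exact List.prefix_append _ _
  · rintro ⟨j, h⟩
    exact h.isInfix.trans (List.drop_suffix j s).isInfix

theorem pv_infix_split {M l t : List Char} {c : Char} (hc : c ∉ M) :
    M <:+: l ++ c :: t ↔ M <:+: l ∨ M <:+: t := by
  constructor
  · intro h
    obtain ⟨j, hj⟩ := (pv_infix_iff_exists_drop _ _).mp h
    rcases le_or_gt j l.length with hle | hlt
    · rw [List.drop_append_of_le_length hle] at hj
      exact Or.inl ((pv_prefix_split hc hj).isInfix.trans (List.drop_suffix j l).isInfix)
    · right
      have hdrop : (l ++ c :: t).drop j = t.drop (j - l.length - 1) := by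
        rw [List.drop_append]
        have h1 : l.drop j = [] := List.drop_eq_nil_of_le (le_of_lt hlt)
        rw [h1, List.nil_append]
        have h2 : j - l.length = (j - l.length - 1) + 1 := by omega
        rw [h2, List.drop_succ_cons]
        simp
      rw [hdrop] at hj
      exact hj.isInfix.trans (List.drop_suffix _ t).isInfix
  · rintro (h | h)
    · exact h.trans ⟨[], c :: t, by simp⟩
    · exact h.trans ⟨l ++ [c], [], by simp⟩

theorem pv_find_eq_of {s M : List Char} {j : Nat} (h1 : M <+: s.drop j)
    (h2 : ∀ i < j, ¬ M <+: s.drop i) : PySem.Chars.find s M = (j : Int) := by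
  have hin : PySem.Chars.isIn M s = true :=
    (PySem.Chars.exists_prefix_drop_iff_isIn M s).mp ⟨j, h1⟩
  have hnn : 0 ≤ PySem.Chars.find s M :=
    (PySem.Chars.find_nonneg_iff s M).mpr ((PySem.Chars.isIn_iff_infix M s).mp hin)
  obtain ⟨hp, hmin⟩ := PySem.Chars.find_spec hnn
  have htn : (PySem.Chars.find s M).toNat = j := by
    rcases Nat.lt_trichotomy (PySem.Chars.find s M).toNat j with h | h | h
    · exact absurd hp (h2 _ h)
    · exact h
    · exact absurd h1 (hmin j h)
  omega

theorem pv_find_append_of_infix {M l t : List Char} {c : Char} (hc : c ∉ M)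
    (h : M <:+: l) :
    PySem.Chars.find (l ++ c :: t) M = PySem.Chars.find l M ∧
      (PySem.Chars.find l M).toNat + M.length ≤ l.length ∧ 0 ≤ PySem.Chars.find l M := by
  have hnn : 0 ≤ PySem.Chars.find l M := (PySem.Chars.find_nonneg_iff l M).mpr h
  obtain ⟨hp, hmin⟩ := PySem.Chars.find_spec hnn
  set p := (PySem.Chars.find l M).toNat with hpdef
  have hple : p ≤ l.length := by
    have := PySem.Chars.find_le_length l M
    omega
  have hbound : p + M.length ≤ l.length := by
    have := hp.length_le
    simp [List.length_drop] at this
    omega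
  have hfind : PySem.Chars.find (l ++ c :: t) M = (p : Int) := by
    apply pv_find_eq_of
    · rw [List.drop_append_of_le_length hple]
      exact hp.trans (List.prefix_append _ _)
    · intro i hi
      rw [List.drop_append_of_le_length (le_of_lt (lt_of_lt_of_le hi hple))]
      intro hcon
      exact hmin i hi (pv_prefix_split hc hcon)
  refine ⟨?_, hbound, hnn⟩
  rw [hfind]; omega

theorem pv_find_append_of_not {M l t : List Char} {c : Char} (hc : c ∉ M)
    (hl : ¬ M <:+: l) (ht : M <:+: t) :
    PySem.Chars.find (l ++ c :: t) M = (l.length : Int) + 1 + PySem.Chars.find t M := by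
  have hnn : 0 ≤ PySem.Chars.find t M := (PySem.Chars.find_nonneg_iff t M).mpr ht
  obtain ⟨hp, hmin⟩ := PySem.Chars.find_spec hnn
  set p := (PySem.Chars.find t M).toNat with hpdef
  have hfind : PySem.Chars.find (l ++ c :: t) M = ((l.length + 1 + p : Nat) : Int) := by
    apply pv_find_eq_of
    · have hdrop : (l ++ c :: t).drop (l.length + 1 + p) = t.drop p := by
        rw [List.drop_append]
        have h1 : l.drop (l.length + 1 + p) = [] := List.drop_eq_nil_of_le (by omega)
        rw [h1, List.nil_append]
        have h2 : l.length + 1 + p - l.length = p + 1 := by omega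
        rw [h2, List.drop_succ_cons]
      rw [hdrop]; exact hp
    · intro i hi hcon
      rcases le_or_gt i l.length with hle | hlt
      · rw [List.drop_append_of_le_length hle] at hcon
        exact hl ((pv_prefix_split hc hcon).isInfix.trans (List.drop_suffix i l).isInfix)
      · have hdrop : (l ++ c :: t).drop i = t.drop (i - l.length - 1) := by
          rw [List.drop_append]
          rw [List.drop_eq_nil_of_le (le_of_lt hlt), List.nil_append]
          have h2 : i - l.length = (i - l.length - 1) + 1 := by omega
          rw [h2, List.drop_succ_cons]
          simp
        rw [hdrop] at hcon
        exact hmin _ (by omega) hcon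
  rw [hfind]
  push_cast
  omega

theorem pv_find_newline {l t : List Char} {c : Char} (hl : c ∉ l) :
    PySem.Chars.find (l ++ c :: t) [c] = (l.length : Int) := by
  apply pv_find_eq_of
  · rw [List.drop_append_of_le_length (Nat.le_refl _), List.drop_length, List.nil_append]
    exact ⟨t, rfl⟩
  · intro i hi hcon
    obtain ⟨r, hr⟩ := hcon
    have hne : l.drop i ≠ [] := by
      intro hnil
      have := congrArg List.length hnil
      simp at this
      omega
    obtain ⟨d0, ds, hd⟩ := List.exists_cons_of_ne_nil hne
    rw [List.drop_append_of_le_length (le_of_lt hi), hd] at hr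
    have hcd : c = d0 := by
      have := congrArg (fun xs => xs.head?) hr
      simpa using this
    have hd0 : d0 ∈ l := by
      have hmem : d0 ∈ l.drop i := by rw [hd]; exact List.mem_cons_self
      exact List.mem_of_mem_drop hmem
    exact hl (hcd ▸ hd0)

theorem pv_find_none_of_not_mem {s : List Char} {c : Char} (h : c ∉ s) :
    PySem.Chars.find s [c] = -1 := by
  rw [PySem.Chars.find_eq_neg_one_iff]
  intro hcon
  exact h (hcon.sublist.subset List.mem_cons_self)

-- --- pieces of splitOn contain no separator ---
theorem pv_splitOnP_pieces {α : Type} (p : α → Bool) (s : List α) :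
    ∀ l ∈ List.splitOnP p s, ∀ a ∈ l, ¬ p a := by
  induction s with
  | nil => intro l hl; rw [List.splitOnP_nil] at hl; simp at hl; simp [hl]
  | cons x xs ih =>
    intro l hl
    rw [List.splitOnP_cons] at hl
    by_cases hx : p x
    · rw [if_pos hx] at hl
      rcases List.mem_cons.mp hl with rfl | hl
      · simp
      · exact ih l hl
    · rw [if_neg hx] at hl
      obtain ⟨h0, t0, hsp⟩ := List.exists_cons_of_ne_nil (List.splitOnP_ne_nil p xs)
      rw [hsp] at hl
      simp [List.modifyHead] at hl
      rcases hl with rfl | hl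
      · intro a ha
        rcases List.mem_cons.mp ha with rfl | ha
        · simp [hx]
        · exact ih h0 (by rw [hsp]; exact List.mem_cons_self) a ha
      · exact ih l (by rw [hsp]; exact List.mem_cons_of_mem _ hl)

-- --- A's flag fold computes pvASpec ---
theorem pv_foldl_AC_true (L : List (List Char)) (s : PySem.Set String) :
    L.foldl pvStepAC (true, s) = (true, L.foldl pvStepBC s) := by
  induction L generalizing s with
  | nil => rfl
  | cons l ls ih =>
    simp only [List.foldl_cons]
    by_cases h : PySem.Chars.isIn pvMarker.toList l = true
    · simp [pvStepAC, pvStepBC, h, ih]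
    · rw [Bool.not_eq_true] at h
      by_cases h2 : l = []
      · simp [pvStepAC, pvStepBC, h2, ih]
      · simp [pvStepAC, pvStepBC, h, h2, ih]

theorem pv_aSpec_cons_false {l : List Char} {ls : List (List Char)}
    (h : PySem.Chars.isIn pvMarker.toList l = false) : pvASpec (l :: ls) = pvASpec ls := by
  unfold pvASpec
  rw [List.findIdx?_cons, h]
  simp only [Bool.false_eq_true, if_false]
  cases hls : ls.findIdx? (fun l => PySem.Chars.isIn pvMarker.toList l) <;> simp

theorem pv_foldl_AC_false (L : List (List Char)) :
    (L.foldl pvStepAC (false, PySem.Set.empty)).2 = pvASpec L := by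
  induction L with
  | nil => simp [pvASpec]
  | cons l ls ih =>
    simp only [List.foldl_cons]
    by_cases h : PySem.Chars.isIn pvMarker.toList l = true
    · have hstep : pvStepAC (false, PySem.Set.empty) l = (true, PySem.Set.empty) := by
        simp [pvStepAC, h]
      rw [hstep, pv_foldl_AC_true]
      unfold pvASpec
      rw [List.findIdx?_cons, h]
      simp [pvG]
    · have hstep : pvStepAC (false, PySem.Set.empty) l = (false, PySem.Set.empty) := by
        simp [pvStepAC, h]
      rw [hstep, ih, pv_aSpec_cons_false (Bool.not_eq_true _ ▸ h)]

-- --- bridges between the Str-level ports and the Chars-level computations ---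
theorem pv_lines_eq (s : String) :
    (PySem.Str.split? s "\n").getD [] = (List.splitOn '\n' s.toList).map String.ofList := by
  have h := PySem.Str.split?_map s "\n"
  have h2 : PySem.Chars.split? s.toList ("\n".toList) = some (List.splitOn '\n' s.toList) := by
    have : ("\n" : String).toList = ['\n'] := rfl
    rw [this]
    simp [PySem.Chars.split?, pv_splitOn_eq]
  rw [h2] at h
  cases hs : PySem.Str.split? s "\n" with
  | none => rw [hs] at h; simp at h
  | some LS =>
    rw [hs] at h
    simp only [Option.map_some, Option.some.injEq] at h
    simp only [Option.getD_some]
    rw [← h, List.map_map]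
    have : (String.ofList ∘ String.toList) = id := by
      funext x; simp
    rw [this, List.map_id]

theorem pv_stepA_bridge (st : Bool × PySem.Set String) (l : List Char) :
    pvStepA st (String.ofList l) = pvStepAC st l := by
  unfold pvStepA pvStepAC
  have h1 : PySem.Str.isIn pvMarker (String.ofList l) = PySem.Chars.isIn pvMarker.toList l := by
    rw [PySem.Str.isIn_eq, String.toList_ofList]
  have h2 : (String.ofList l = "") ↔ (l = []) := by
    constructor
    · intro hc; have := congrArg String.toList hc; simpa using this
    · intro hc; simp [hc]
  have h3 : PySem.Str.strip (String.ofList l) = String.ofList (PySem.Chars.strip l) := by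
    apply String.toList_inj.mp
    rw [PySem.Str.toList_strip, String.toList_ofList, String.toList_ofList]
  rw [h1, h3]
  by_cases hin : PySem.Chars.isIn pvMarker.toList l
  · simp [hin]
  · simp [hin, h2]

theorem pv_stepB_bridge (s : PySem.Set String) (l : List Char) :
    pvStepB s (String.ofList l) = pvStepBC s l := by
  unfold pvStepB pvStepBC
  have h1 : PySem.Str.isIn pvMarker (String.ofList l) = PySem.Chars.isIn pvMarker.toList l := by
    rw [PySem.Str.isIn_eq, String.toList_ofList]
  have h2 : (String.ofList l = "") ↔ (l = []) := by
    constructor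
    · intro hc; have := congrArg String.toList hc; simpa using this
    · intro hc; simp [hc]
  have h3 : PySem.Str.strip (String.ofList l) = String.ofList (PySem.Chars.strip l) := by
    apply String.toList_inj.mp
    rw [PySem.Str.toList_strip, String.toList_ofList, String.toList_ofList]
  rw [h1, h3]
  by_cases hin : PySem.Chars.isIn pvMarker.toList l
  · simp [hin]
  · simp [hin, h2]

theorem pv_foldB_bridge (L : List (List Char)) (s : PySem.Set String) :
    (L.map String.ofList).foldl pvStepB s = L.foldl pvStepBC s := by
  rw [List.foldl_map]
  exact PySem.List.foldl_congr_mem _ _ _ _ (fun acc x _ => pv_stepB_bridge acc x)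

theorem pv_portA_eq (command unused : String) :
    parse_unused_py command unused = [(command, pvASpec (List.splitOn '\n' unused.toList))] := by
  unfold parse_unused_py pvLines
  rw [pv_lines_eq, List.foldl_map]
  have hcongr : (List.splitOn '\n' unused.toList).foldl (fun st l => pvStepA st (String.ofList l))
      (false, PySem.Set.empty) = (List.splitOn '\n' unused.toList).foldl pvStepAC (false, PySem.Set.empty) :=
    PySem.List.foldl_congr_mem _ _ _ _ (fun acc x _ => pv_stepA_bridge acc x)
  simp only [hcongr, pv_foldl_AC_false]

theorem pv_portB_eq (command unused : String) :
    parse_unused_py_alt command unused = [(command, pvBCore unused.toList)] := by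
  have hfind : PySem.Str.find unused pvMarker = PySem.Chars.find unused.toList pvMarker.toList := by
    rw [PySem.Str.find_eq]
  simp only [parse_unused_py_alt, pvBCore]
  rw [hfind]
  by_cases hp : PySem.Chars.find unused.toList pvMarker.toList = -1
  · rw [if_pos hp, if_pos hp]
  · rw [if_neg hp, if_neg hp]
    have hge : 0 ≤ PySem.Chars.find unused.toList pvMarker.toList := by
      have := PySem.Chars.neg_one_le_find unused.toList pvMarker.toList; omega
    have hlen : PySem.Str.len pvMarker = (pvMarker.toList.length : Int) := by
      rw [PySem.Str.len_eq]
    rw [hlen]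
    have htail : (PySem.Str.slice unused (some (PySem.Chars.find unused.toList pvMarker.toList + (pvMarker.toList.length : Int))) none).toList
        = unused.toList.drop ((PySem.Chars.find unused.toList pvMarker.toList).toNat + pvMarker.toList.length) := by
      rw [PySem.Str.toList_slice, PySem.Chars.slice_eq_listSlice,
          PySem.List.slice_from _ (by omega)]
      rw [show (PySem.Chars.find unused.toList pvMarker.toList + (pvMarker.toList.length : Int)).toNat
          = (PySem.Chars.find unused.toList pvMarker.toList).toNat + pvMarker.toList.length by omega]
    have hq : PySem.Str.find (PySem.Str.slice unused (some (PySem.Chars.find unused.toList pvMarker.toList + (pvMarker.toList.length : Int))) none) "\n"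
        = PySem.Chars.find (unused.toList.drop ((PySem.Chars.find unused.toList pvMarker.toList).toNat + pvMarker.toList.length)) ['\n'] := by
      rw [PySem.Str.find_eq, htail]
      rfl
    rw [hq]
    by_cases hq1 : PySem.Chars.find (unused.toList.drop ((PySem.Chars.find unused.toList pvMarker.toList).toNat + pvMarker.toList.length)) ['\n'] = -1
    · rw [if_pos hq1, if_pos hq1]
    · rw [if_neg hq1, if_neg hq1]
      have hqge : 0 ≤ PySem.Chars.find (unused.toList.drop ((PySem.Chars.find unused.toList pvMarker.toList).toNat + pvMarker.toList.length)) ['\n'] := by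
        have := PySem.Chars.neg_one_le_find (unused.toList.drop ((PySem.Chars.find unused.toList pvMarker.toList).toNat + pvMarker.toList.length)) ['\n']
        omega
      have hrest : (PySem.Str.slice (PySem.Str.slice unused (some (PySem.Chars.find unused.toList pvMarker.toList + (pvMarker.toList.length : Int))) none)
            (some (PySem.Chars.find (unused.toList.drop ((PySem.Chars.find unused.toList pvMarker.toList).toNat + pvMarker.toList.length)) ['\n'] + 1)) none).toList
          = (unused.toList.drop ((PySem.Chars.find unused.toList pvMarker.toList).toNat + pvMarker.toList.length)).drop
              ((PySem.Chars.find (unused.toList.drop ((PySem.Chars.find unused.toList pvMarker.toList).toNat + pvMarker.toList.length)) ['\n']).toNat + 1) := by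
        rw [PySem.Str.toList_slice, PySem.Chars.slice_eq_listSlice,
            PySem.List.slice_from _ (by omega), htail]
        rw [show (PySem.Chars.find (unused.toList.drop ((PySem.Chars.find unused.toList pvMarker.toList).toNat + pvMarker.toList.length)) ['\n'] + 1).toNat
            = (PySem.Chars.find (unused.toList.drop ((PySem.Chars.find unused.toList pvMarker.toList).toNat + pvMarker.toList.length)) ['\n']).toNat + 1 by omega]
      rw [pv_lines_eq, hrest, pv_foldB_bridge]
      rfl

-- --- concrete fact about the marker ---
theorem pv_nl_not_mem_M : '\n' ∉ pvMarker.toList := by decide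

-- --- pvBCore on a line structure ---
theorem pv_bCore_reduce {l T : List Char} (hnot : ¬ pvMarker.toList <:+: l) :
    pvBCore (l ++ '\n' :: T) = pvBCore T := by
  by_cases hT : pvMarker.toList <:+: T
  · have hfind := pv_find_append_of_not pv_nl_not_mem_M hnot hT (l := l)
    have hnnT : 0 ≤ PySem.Chars.find T pvMarker.toList := (PySem.Chars.find_nonneg_iff T pvMarker.toList).mpr hT
    have hdrop : (l ++ '\n' :: T).drop (((l.length : Int) + 1 + PySem.Chars.find T pvMarker.toList).toNat + pvMarker.toList.length)
        = T.drop ((PySem.Chars.find T pvMarker.toList).toNat + pvMarker.toList.length) := by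
      rw [List.drop_append]
      rw [List.drop_eq_nil_of_le (by omega), List.nil_append]
      rw [show ((l.length : Int) + 1 + PySem.Chars.find T pvMarker.toList).toNat + pvMarker.toList.length - l.length
          = ((PySem.Chars.find T pvMarker.toList).toNat + pvMarker.toList.length) + 1 by omega]
      rw [List.drop_succ_cons]
    unfold pvBCore
    rw [hfind,
        if_neg (show ¬((l.length : Int) + 1 + PySem.Chars.find T pvMarker.toList = -1) by omega),
        if_neg (show ¬(PySem.Chars.find T pvMarker.toList = -1) by omega),
        hdrop]
  · have h1 : PySem.Chars.find (l ++ '\n' :: T) pvMarker.toList = -1 := by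
      rw [PySem.Chars.find_eq_neg_one_iff, pv_infix_split pv_nl_not_mem_M]
      tauto
    have h2 : PySem.Chars.find T pvMarker.toList = -1 := (PySem.Chars.find_eq_neg_one_iff T pvMarker.toList).mpr hT
    unfold pvBCore
    rw [h1, h2]
    simp

theorem pv_main : ∀ (L : List (List Char)), L ≠ [] → (∀ l ∈ L, '\n' ∉ l) →
    pvBCore (['\n'].intercalate L) = pvASpec L := by
  intro L
  induction L with
  | nil => intro h; exact absurd rfl h
  | cons l ls ih =>
    intro _ hmem
    have hlnl : '\n' ∉ l := hmem l List.mem_cons_self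
    by_cases hin : PySem.Chars.isIn pvMarker.toList l = true
    · have hinf : pvMarker.toList <:+: l := (PySem.Chars.isIn_iff_infix pvMarker.toList l).mp hin
      have hRHS : pvASpec (l :: ls) = pvG ls := by
        unfold pvASpec
        rw [List.findIdx?_cons, hin]
        simp
      rw [hRHS]
      cases ls with
      | nil =>
        rw [show ['\n'].intercalate [l] = l by simp [List.intercalate]]
        have hnn : 0 ≤ PySem.Chars.find l pvMarker.toList := (PySem.Chars.find_nonneg_iff l pvMarker.toList).mpr hinf
        unfold pvBCore
        rw [if_neg (by omega)]
        have hq : PySem.Chars.find (l.drop ((PySem.Chars.find l pvMarker.toList).toNat + pvMarker.toList.length)) ['\n'] = -1 := by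
          apply pv_find_none_of_not_mem
          intro hc
          exact hlnl (List.mem_of_mem_drop hc)
        rw [if_pos hq]
        rfl
      | cons l2 ls2 =>
        have hT : ['\n'].intercalate (l :: l2 :: ls2) = l ++ '\n' :: ['\n'].intercalate (l2 :: ls2) := by
          simp [List.intercalate]
        rw [hT]
        obtain ⟨hfind, hbound, hnn⟩ := pv_find_append_of_infix (t := ['\n'].intercalate (l2 :: ls2)) pv_nl_not_mem_M hinf
        unfold pvBCore
        rw [hfind, if_neg (by omega)]
        have htail : (l ++ '\n' :: ['\n'].intercalate (l2 :: ls2)).drop ((PySem.Chars.find l pvMarker.toList).toNat + pvMarker.toList.length)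
            = l.drop ((PySem.Chars.find l pvMarker.toList).toNat + pvMarker.toList.length) ++ '\n' :: ['\n'].intercalate (l2 :: ls2) :=
          List.drop_append_of_le_length hbound
        rw [htail]
        have hnl' : '\n' ∉ l.drop ((PySem.Chars.find l pvMarker.toList).toNat + pvMarker.toList.length) := by
          intro hc; exact hlnl (List.mem_of_mem_drop hc)
        have hq := pv_find_newline (t := ['\n'].intercalate (l2 :: ls2)) hnl'
        rw [hq, if_neg (by omega)]
        have hdrop : (l.drop ((PySem.Chars.find l pvMarker.toList).toNat + pvMarker.toList.length) ++ '\n' :: ['\n'].intercalate (l2 :: ls2)).drop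
            ((((l.drop ((PySem.Chars.find l pvMarker.toList).toNat + pvMarker.toList.length)).length : Int)).toNat + 1)
            = ['\n'].intercalate (l2 :: ls2) := by
          rw [show ((((l.drop ((PySem.Chars.find l pvMarker.toList).toNat + pvMarker.toList.length)).length : Int)).toNat + 1)
              = (l.drop ((PySem.Chars.find l pvMarker.toList).toNat + pvMarker.toList.length)).length + 1 by omega]
          rw [List.drop_append]
          rw [List.drop_eq_nil_of_le (by omega), List.nil_append]
          rw [show (l.drop ((PySem.Chars.find l pvMarker.toList).toNat + pvMarker.toList.length)).length + 1
              - (l.drop ((PySem.Chars.find l pvMarker.toList).toNat + pvMarker.toList.length)).length = 1 by omega]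
          rw [List.drop_succ_cons, List.drop_zero]
        rw [hdrop]
        have hpieces : ∀ x ∈ (l2 :: ls2), '\n' ∉ x := fun x hx => hmem x (List.mem_cons_of_mem _ hx)
        rw [List.splitOn_intercalate (l2 :: ls2) '\n' hpieces (List.cons_ne_nil _ _)]
    · have hninf : ¬ pvMarker.toList <:+: l := by
        rw [← PySem.Chars.isIn_eq_false_iff]
        exact Bool.not_eq_true _ ▸ hin
      cases ls with
      | nil =>
        rw [show ['\n'].intercalate [l] = l by simp [List.intercalate]]
        have h1 : PySem.Chars.find l pvMarker.toList = -1 := (PySem.Chars.find_eq_neg_one_iff l pvMarker.toList).mpr hninf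
        unfold pvBCore pvASpec
        rw [h1, if_pos rfl, List.findIdx?_cons]
        simp [hin]
      | cons l2 ls2 =>
        have hT : ['\n'].intercalate (l :: l2 :: ls2) = l ++ '\n' :: ['\n'].intercalate (l2 :: ls2) := by
          simp [List.intercalate]
        rw [hT, pv_bCore_reduce hninf]
        rw [ih (List.cons_ne_nil _ _) (fun x hx => hmem x (List.mem_cons_of_mem _ hx))]
        exact (pv_aSpec_cons_false (l := l) (ls := l2 :: ls2) (Bool.not_eq_true _ ▸ hin)).symm

-- ===== VERDICT (by name: the statement is the Claim_ definition above) =====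
theorem parse_unused_py_spec : Claim_equal_parse_unused_py := by
  intro command unused _
  unfold Spec_parse_unused_py
  rw [pv_portA_eq, pv_portB_eq]
  have hpieces : ∀ l ∈ List.splitOn '\n' unused.toList, '\n' ∉ l := by
    intro l hl hmemc
    exact pv_splitOnP_pieces (· == '\n') unused.toList l hl '\n' hmemc (by simp)
  have hne : List.splitOn '\n' unused.toList ≠ [] := List.splitOnP_ne_nil _ _
  have hint : ['\n'].intercalate (List.splitOn '\n' unused.toList) = unused.toList :=
    List.intercalate_splitOn unused.toList '\n'
  have hmain := pv_main _ hne hpieces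
  rw [hint] at hmain
  rw [hmain]
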